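-- pv_equiv track=rewrite | github.com/dannywillowliu-uchi/C_compiler_orchestrated | src/compiler/preprocessor.py | _parse_macro_args
-- ===== SOURCE A (Python) =====
-- class PreprocessorError(Exception):
-- 	"""Error raised during preprocessing."""
--
-- 	def __init__(self, message: str, filename: str = "<stdin>", line: int = 0) -> None:
-- 		self.filename = filename
-- 		self.line = line
-- 		super().__init__(f"{filename}:{line}: {message}")
--
-- def _parse_macro_args(
--
-- 	text: str,
-- 	start: int,
-- 	filename: str,
-- 	line_num: int,
-- ) -> tuple[list[str] | None, int]:
-- 	"""Parse macro arguments from text starting at '('.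
--
-- 	Returns (args_list, position_after_closing_paren) or (None, start) on failure.
-- 	"""
-- 	if start >= len(text) or text[start] != "(":
-- 		return None, start
--
-- 	depth = 1
-- 	i = start + 1
-- 	args: list[str] = []
-- 	current_arg: list[str] = []
--
-- 	while i < len(text) and depth > 0:
-- 		ch = text[i]
--
-- 		if ch == "(":
-- 			depth += 1
-- 			current_arg.append(ch)
-- 		elif ch == ")":
-- 			depth -= 1
-- 			if depth == 0:
-- 				args.append("".join(current_arg))
-- 			else:
-- 				current_arg.append(ch)
-- 		elif ch == "," and depth == 1:
-- 			args.append("".join(current_arg))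
-- 			current_arg = []
-- 		elif ch == '"':
-- 			# Skip string literals
-- 			current_arg.append(ch)
-- 			i += 1
-- 			while i < len(text) and text[i] != '"':
-- 				if text[i] == "\\":
-- 					current_arg.append(text[i])
-- 					i += 1
-- 					if i < len(text):
-- 						current_arg.append(text[i])
-- 				else:
-- 					current_arg.append(text[i])
-- 				i += 1
-- 			if i < len(text):
-- 				current_arg.append(text[i])
-- 		elif ch == "'":
-- 			# Skip char literals
-- 			current_arg.append(ch)
-- 			i += 1
-- 			while i < len(text) and text[i] != "'":
-- 				if text[i] == "\\":
-- 					current_arg.append(text[i])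
-- 					i += 1
-- 					if i < len(text):
-- 						current_arg.append(text[i])
-- 				else:
-- 					current_arg.append(text[i])
-- 				i += 1
-- 			if i < len(text):
-- 				current_arg.append(text[i])
-- 		else:
-- 			current_arg.append(ch)
--
-- 		i += 1
--
-- 	if depth != 0:
-- 		raise PreprocessorError("Unterminated macro argument list", filename, line_num)
--
-- 	return args, i
-- ===== SOURCE B (Python) =====
-- class PreprocessorError(Exception):
-- 	"""Error raised during preprocessing."""
--
-- 	def __init__(self, message: str, filename: str = "<stdin>", line: int = 0) -> None:
-- 		self.filename = filename
-- 		self.line = line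
-- 		super().__init__(f"{filename}:{line}: {message}")
--
--
-- def _parse_macro_args(
-- 	text: str,
-- 	start: int,
-- 	filename: str,
-- 	line_num: int,
-- ) -> tuple:
-- 	"""Flat single-pass scanner: one loop with quote/escape state flags
-- 	instead of nested inner while-loops for string/char literals."""
-- 	if start >= len(text) or text[start] != "(":
-- 		return None, start
--
-- 	depth = 1
-- 	i = start + 1
-- 	args = []
-- 	current_arg = []
-- 	quote = None  # None, '"' or "'": which literal we are inside
-- 	escape = False
--
-- 	while i < len(text) and depth > 0:
-- 		ch = text[i]
-- 		if escape:
-- 			current_arg.append(ch)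
-- 			escape = False
-- 		elif quote is not None:
-- 			current_arg.append(ch)
-- 			if ch == "\\":
-- 				escape = True
-- 			elif ch == quote:
-- 				quote = None
-- 		elif ch == "(":
-- 			depth += 1
-- 			current_arg.append(ch)
-- 		elif ch == ")":
-- 			depth -= 1
-- 			if depth == 0:
-- 				args.append("".join(current_arg))
-- 			else:
-- 				current_arg.append(ch)
-- 		elif ch == "," and depth == 1:
-- 			args.append("".join(current_arg))
-- 			current_arg = []
-- 		elif ch == '"' or ch == "'":
-- 			quote = ch
-- 			current_arg.append(ch)
-- 		else:
-- 			current_arg.append(ch)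
-- 		i += 1
--
-- 	if depth != 0:
-- 		raise PreprocessorError("Unterminated macro argument list", filename, line_num)
--
-- 	return args, i
-- ===== Notes on version B (the rewrite author's own statement) =====
-- stated objective: idiomatic
-- what changed: Replaces A's nested inner while-loops that skip string/char literals by a flat single-pass scanner with quote/escape state flags, one uniform loop over i.
import Mathlib
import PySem

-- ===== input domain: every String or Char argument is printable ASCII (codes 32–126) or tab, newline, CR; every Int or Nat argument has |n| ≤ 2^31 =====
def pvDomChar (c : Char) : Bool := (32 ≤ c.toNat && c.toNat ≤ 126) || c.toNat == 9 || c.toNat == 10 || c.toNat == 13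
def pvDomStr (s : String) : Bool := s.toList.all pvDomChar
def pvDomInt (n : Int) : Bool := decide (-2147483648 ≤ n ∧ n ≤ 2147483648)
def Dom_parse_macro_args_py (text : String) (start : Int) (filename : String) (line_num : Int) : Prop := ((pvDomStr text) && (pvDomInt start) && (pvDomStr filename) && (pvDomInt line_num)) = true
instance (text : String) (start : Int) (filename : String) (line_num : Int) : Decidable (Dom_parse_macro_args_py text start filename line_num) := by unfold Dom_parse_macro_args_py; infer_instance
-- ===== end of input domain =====

-- B replaces A's nested inner while-loops for string/char literals by a flat single loop with
-- quote/escape state flags (same return value; the PreprocessorError raise of A is excluded by Pre_).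
-- Both loops carry a fuel argument as a pure totality guard (the top-level call supplies
-- fuel > len(text) - i, so the fuel-0 base case, which duplicates the loop-exit value, is never
-- the deciding branch); the loop bodies are otherwise step-for-step their Python's code.

-- ===== PORT A =====
-- text[i] for the in-range indices the loops reach (-len ≤ i < len): exact there
def pvGet (s : List Char) (i : Int) : Char := PySem.List.pyGetD s i ' '

-- A's inner `while i < len(text) and text[i] != q:` literal-skipping loop
def pvSkipLitA (s : List Char) (q : Char) : Nat → List Char → Int → List Char × Int
  | 0, cur, i => (cur, i)
  | fuel + 1, cur, i =>
    if i < (s.length : Int) ∧ pvGet s i ≠ q then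
      if pvGet s i = '\\' then
        pvSkipLitA s q fuel (cur ++ [pvGet s i] ++ (if i + 1 < (s.length : Int) then [pvGet s (i + 1)] else [])) (i + 2)
      else
        pvSkipLitA s q fuel (cur ++ [pvGet s i]) (i + 1)
    else (cur, i)

-- A's outer `while i < len(text) and depth > 0:` loop
def pvLoopA (s : List Char) : Nat → Int → Int → List String → List Char → Option (List String) × Int
  | 0, i, depth, args, _ => if depth ≠ 0 then (none, 0) else (some args, i)
  | fuel + 1, i, depth, args, cur =>
    if i < (s.length : Int) ∧ 0 < depth then
      if pvGet s i = '(' then pvLoopA s fuel (i + 1) (depth + 1) args (cur ++ [pvGet s i])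
      else if pvGet s i = ')' then
        if depth - 1 = 0 then pvLoopA s fuel (i + 1) (depth - 1) (args ++ [String.ofList cur]) cur
        else pvLoopA s fuel (i + 1) (depth - 1) args (cur ++ [pvGet s i])
      else if pvGet s i = ',' ∧ depth = 1 then pvLoopA s fuel (i + 1) depth (args ++ [String.ofList cur]) []
      else if pvGet s i = '"' then
        pvLoopA s fuel ((pvSkipLitA s '"' fuel (cur ++ [pvGet s i]) (i + 1)).2 + 1) depth args
          (if (pvSkipLitA s '"' fuel (cur ++ [pvGet s i]) (i + 1)).2 < (s.length : Int)
           then (pvSkipLitA s '"' fuel (cur ++ [pvGet s i]) (i + 1)).1 ++ [pvGet s (pvSkipLitA s '"' fuel (cur ++ [pvGet s i]) (i + 1)).2]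
           else (pvSkipLitA s '"' fuel (cur ++ [pvGet s i]) (i + 1)).1)
      else if pvGet s i = '\'' then
        pvLoopA s fuel ((pvSkipLitA s '\'' fuel (cur ++ [pvGet s i]) (i + 1)).2 + 1) depth args
          (if (pvSkipLitA s '\'' fuel (cur ++ [pvGet s i]) (i + 1)).2 < (s.length : Int)
           then (pvSkipLitA s '\'' fuel (cur ++ [pvGet s i]) (i + 1)).1 ++ [pvGet s (pvSkipLitA s '\'' fuel (cur ++ [pvGet s i]) (i + 1)).2]
           else (pvSkipLitA s '\'' fuel (cur ++ [pvGet s i]) (i + 1)).1)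
      else pvLoopA s fuel (i + 1) depth args (cur ++ [pvGet s i])
    else if depth ≠ 0 then (none, 0)  -- `raise PreprocessorError(...)`: excluded by Pre_; marker value
    else (some args, i)

def parse_macro_args_py (text : String) (start : Int) (filename : String) (line_num : Int) :
    Option (List String) × Int :=
  if (text.toList.length : Int) ≤ start then (none, start)
  else
    match PySem.List.pyGet? text.toList start with
    | none => (none, 0)  -- IndexError at text[start] (start < -len): excluded by Pre_; marker value
    | some c =>
      if c ≠ '(' then (none, start)
      else pvLoopA text.toList (((text.toList.length : Int) - (start + 1)).toNat + 1) (start + 1) 1 [] []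

-- ===== PORT B =====
-- B's flat scanner: one loop, state = (quote : which literal we are inside, escape flag)
def pvLoopB (s : List Char) : Nat → Int → Int → List String → List Char → Option Char → Bool → Option (List String) × Int
  | 0, i, depth, args, _, _, _ => if depth ≠ 0 then (none, 0) else (some args, i)
  | fuel + 1, i, depth, args, cur, quote, escape =>
    if i < (s.length : Int) ∧ 0 < depth then
      if escape then pvLoopB s fuel (i + 1) depth args (cur ++ [pvGet s i]) quote false
      else
        match quote with
        | some q =>
          if pvGet s i = '\\' then pvLoopB s fuel (i + 1) depth args (cur ++ [pvGet s i]) (some q) true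
          else if pvGet s i = q then pvLoopB s fuel (i + 1) depth args (cur ++ [pvGet s i]) none false
          else pvLoopB s fuel (i + 1) depth args (cur ++ [pvGet s i]) (some q) false
        | none =>
          if pvGet s i = '(' then pvLoopB s fuel (i + 1) (depth + 1) args (cur ++ [pvGet s i]) none false
          else if pvGet s i = ')' then
            if depth - 1 = 0 then pvLoopB s fuel (i + 1) (depth - 1) (args ++ [String.ofList cur]) cur none false
            else pvLoopB s fuel (i + 1) (depth - 1) args (cur ++ [pvGet s i]) none false
          else if pvGet s i = ',' ∧ depth = 1 then pvLoopB s fuel (i + 1) depth (args ++ [String.ofList cur]) [] none false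
          else if pvGet s i = '"' ∨ pvGet s i = '\'' then pvLoopB s fuel (i + 1) depth args (cur ++ [pvGet s i]) (some (pvGet s i)) false
          else pvLoopB s fuel (i + 1) depth args (cur ++ [pvGet s i]) none false
    else if depth ≠ 0 then (none, 0)  -- `raise PreprocessorError(...)`: excluded by Pre_; marker value
    else (some args, i)

def parse_macro_args_py_alt (text : String) (start : Int) (filename : String) (line_num : Int) :
    Option (List String) × Int :=
  if (text.toList.length : Int) ≤ start then (none, start)
  else
    match PySem.List.pyGet? text.toList start with
    | none => (none, 0)  -- IndexError at text[start] (start < -len): excluded by Pre_; marker value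
    | some c =>
      if c ≠ '(' then (none, start)
      else pvLoopB text.toList (((text.toList.length : Int) - (start + 1)).toNat + 1) (start + 1) 1 [] [] none false

-- ===== PRECONDITION & SPEC =====
-- Structural "the argument list is terminated" check on the character stream the loop will read
-- (for -len ≤ start < 0 Python's per-access negative-index wraparound makes that stream
-- text[start+len+1:] ++ text). Independent of both ports.
def pvTermAux : List Char → Nat → Option Char → Bool
  | [], _, _ => false
  | c :: r, d, some q =>
    if c = q then pvTermAux r d none
    else if c = '\\' then (match r with | [] => false | _ :: r2 => pvTermAux r2 d (some q))
    else pvTermAux r d (some q)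
  | c :: r, d, none =>
    if c = '(' then pvTermAux r (d + 1) none
    else if c = ')' then (if d = 1 then true else pvTermAux r (d - 1) none)
    else if c = '"' then pvTermAux r d (some '"')
    else if c = '\'' then pvTermAux r d (some '\'')
    else pvTermAux r d none

def pvTerm (l : List Char) (d : Nat) : Bool := pvTermAux l d none

-- Pre_ excludes exactly the inputs where A raises: IndexError when start < -len(text), and
-- PreprocessorError when the argument list after '(' is unterminated.
def Pre_parse_macro_args_py (text : String) (start : Int) (filename : String) (line_num : Int) : Prop :=
  (text.toList.length : Int) ≤ start ∨
  (-(text.toList.length : Int) ≤ start ∧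
    (PySem.List.pyGet? text.toList start ≠ some '(' ∨
      pvTerm (if start < 0
              then text.toList.drop ((start + text.toList.length).toNat + 1) ++ text.toList
              else text.toList.drop (start.toNat + 1)) 1 = true))
instance (text : String) (start : Int) (filename : String) (line_num : Int) :
    Decidable (Pre_parse_macro_args_py text start filename line_num) := by
  unfold Pre_parse_macro_args_py; infer_instance

def pvWitness_parse_macro_args_py : String × Int × String × Int := ("(a,b)", 0, "f", 1)

def Spec_parse_macro_args_py (text : String) (start : Int) (filename : String) (line_num : Int) (out : Option (List String) × Int) : Prop := out = parse_macro_args_py_alt text start filename line_num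
instance (text : String) (start : Int) (filename : String) (line_num : Int) (out : Option (List String) × Int) : Decidable (Spec_parse_macro_args_py text start filename line_num out) := by unfold Spec_parse_macro_args_py; infer_instance

-- ===== CLAIM (what is proved, stated in full; the proofs are below) =====
def Claim_equal_parse_macro_args_py : Prop := ∀ (text : String) (start : Int) (filename : String) (line_num : Int), Dom_parse_macro_args_py text start filename line_num → Pre_parse_macro_args_py text start filename line_num → Spec_parse_macro_args_py text start filename line_num (parse_macro_args_py text start filename line_num)

-- ===== LEMMAS AND PROOFS =====
def pvMeas (s : List Char) (i : Int) : Nat := ((s.length : Int) - i).toNat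

-- loop-exit values are fuel-independent
lemma pvSkipLitA_exit (s : List Char) (q : Char) (f : Nat) (cur : List Char) (i : Int)
    (h : ¬ (i < (s.length : Int) ∧ pvGet s i ≠ q)) : pvSkipLitA s q f cur i = (cur, i) := by
  cases f with
  | zero => rfl
  | succ f => simp only [pvSkipLitA, if_neg h]

lemma pvLoopA_exit (s : List Char) (f : Nat) (i depth : Int) (args : List String) (cur : List Char)
    (h : ¬ (i < (s.length : Int) ∧ 0 < depth)) :
    pvLoopA s f i depth args cur = if depth ≠ 0 then (none, 0) else (some args, i) := by
  cases f with
  | zero => rfl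
  | succ f => simp only [pvLoopA, if_neg h]

lemma pvLoopB_exit (s : List Char) (f : Nat) (i depth : Int) (args : List String) (cur : List Char)
    (quote : Option Char) (escape : Bool) (h : ¬ (i < (s.length : Int) ∧ 0 < depth)) :
    pvLoopB s f i depth args cur quote escape = if depth ≠ 0 then (none, 0) else (some args, i) := by
  cases f with
  | zero => rfl
  | succ f => simp only [pvLoopB, if_neg h]

-- Main invariant: outside a literal the two loops coincide; inside a literal (quote = some q,
-- escape = false) B's flat loop computes exactly the continuation of A after its inner skip loop.
-- Fuel hypotheses: each loop/skip is run with more fuel than characters it can still consume.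
lemma pvMain (s : List Char) : ∀ (fB : Nat) (i depth : Int) (args : List String) (cur : List Char),
    pvMeas s i < fB →
    (∀ fA : Nat, pvMeas s i < fA →
      pvLoopA s fA i depth args cur = pvLoopB s fB i depth args cur none false) ∧
    (∀ (fA fS : Nat) (q : Char), pvMeas s i ≤ fA → pvMeas s i ≤ fS → q ≠ '\\' → 0 < depth →
      pvLoopB s fB i depth args cur (some q) false =
        pvLoopA s fA ((pvSkipLitA s q fS cur i).2 + 1) depth args
          (if (pvSkipLitA s q fS cur i).2 < (s.length : Int)
           then (pvSkipLitA s q fS cur i).1 ++ [pvGet s (pvSkipLitA s q fS cur i).2]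
           else (pvSkipLitA s q fS cur i).1)) := by
  intro fB
  induction fB using Nat.strong_induction_on with
  | _ fB IH =>
  intro i depth args cur hmB
  by_cases hid : i < (s.length : Int) ∧ 0 < depth
  · obtain ⟨hi, hd0⟩ := hid
    have hm1 : 1 ≤ pvMeas s i := by unfold pvMeas; omega
    have hmB1 : pvMeas s (i + 1) < fB - 1 := by unfold pvMeas at *; omega
    have hBpos : fB ≠ 0 := by omega
    obtain ⟨gB, rfl⟩ : ∃ gB, fB = gB + 1 := ⟨fB - 1, by omega⟩
    have hltB : gB < gB + 1 := Nat.lt_succ_self gB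
    constructor
    · -- part 1: outside a literal the two loops take the same branches
      intro fA hmA
      obtain ⟨gA, rfl⟩ : ∃ gA, fA = gA + 1 := ⟨fA - 1, by omega⟩
      have hmA1 : pvMeas s (i + 1) < gA := by unfold pvMeas at *; omega
      have hmB1' : pvMeas s (i + 1) < gB := by unfold pvMeas at *; omega
      simp only [pvLoopA, pvLoopB, if_pos (And.intro hi hd0), Bool.false_eq_true, if_false]
      by_cases g1 : pvGet s i = '('
      · rw [if_pos g1, if_pos g1]
        exact (IH gB hltB (i + 1) (depth + 1) args (cur ++ [pvGet s i]) hmB1').1 gA hmA1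
      rw [if_neg g1, if_neg g1]
      by_cases g2 : pvGet s i = ')'
      · rw [if_pos g2, if_pos g2]
        by_cases g2' : depth - 1 = 0
        · rw [if_pos g2', if_pos g2']
          exact (IH gB hltB (i + 1) (depth - 1) (args ++ [String.ofList cur]) cur hmB1').1 gA hmA1
        · rw [if_neg g2', if_neg g2']
          exact (IH gB hltB (i + 1) (depth - 1) args (cur ++ [pvGet s i]) hmB1').1 gA hmA1
      rw [if_neg g2, if_neg g2]
      by_cases g3 : pvGet s i = ',' ∧ depth = 1
      · rw [if_pos g3, if_pos g3]
        exact (IH gB hltB (i + 1) depth (args ++ [String.ofList cur]) [] hmB1').1 gA hmA1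
      rw [if_neg g3, if_neg g3]
      by_cases g4 : pvGet s i = '"'
      · rw [if_pos g4, if_pos (Or.inl g4)]
        have h2 := (IH gB hltB (i + 1) depth args (cur ++ [pvGet s i]) hmB1').2
          gA gA (pvGet s i) (by omega) (by omega) (by rw [g4]; decide) hd0
        rw [h2, g4]
      rw [if_neg g4]
      by_cases g5 : pvGet s i = '\''
      · rw [if_pos g5, if_pos (Or.inr g5)]
        have h2 := (IH gB hltB (i + 1) depth args (cur ++ [pvGet s i]) hmB1').2
          gA gA (pvGet s i) (by omega) (by omega) (by rw [g5]; decide) hd0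
        rw [h2, g5]
      rw [if_neg g5, if_neg (by simp [g4, g5])]
      exact (IH gB hltB (i + 1) depth args (cur ++ [pvGet s i]) hmB1').1 gA hmA1
    · -- part 2: inside a literal B computes A's inner-skip continuation
      intro fA fS q hmA hmS hq hd
      have hSpos : fS ≠ 0 := by omega
      obtain ⟨gS, rfl⟩ : ∃ gS, fS = gS + 1 := ⟨fS - 1, by omega⟩
      by_cases h1 : pvGet s i = q
      · -- closing quote
        have hskip : pvSkipLitA s q (gS + 1) cur i = (cur, i) :=
          pvSkipLitA_exit s q (gS + 1) cur i (by simp [h1])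
        rw [hskip]
        dsimp only
        rw [if_pos hi]
        simp only [pvLoopB, if_pos (And.intro hi hd), Bool.false_eq_true, if_false]
        rw [if_neg (show ¬ pvGet s i = '\\' by rw [h1]; exact hq), if_pos h1]
        exact ((IH gB hltB (i + 1) depth args (cur ++ [pvGet s i]) (by unfold pvMeas at *; omega)).1
          fA (by unfold pvMeas at *; omega)).symm
      by_cases h2 : pvGet s i = '\\'
      · -- backslash: escape step
        simp only [pvLoopB, if_pos (And.intro hi hd), Bool.false_eq_true, if_false]
        rw [if_pos h2]
        have hskip : pvSkipLitA s q (gS + 1) cur i =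
            pvSkipLitA s q gS (cur ++ [pvGet s i] ++ (if i + 1 < (s.length : Int) then [pvGet s (i + 1)] else [])) (i + 2) := by
          simp only [pvSkipLitA, if_pos (And.intro hi (fun (hh : pvGet s i = q) => hq (by rw [← hh]; exact h2))), if_pos h2]
        rw [hskip]
        have hBpos2 : gB ≠ 0 := by unfold pvMeas at *; omega
        obtain ⟨gB2, rfl⟩ : ∃ gB2, gB = gB2 + 1 := ⟨gB - 1, by omega⟩
        by_cases h3 : i + 1 < (s.length : Int)
        · rw [if_pos h3]
          simp only [pvLoopB, if_pos (And.intro h3 hd), if_pos rfl]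
          have h2' := (IH gB2 (by omega) (i + 2) depth args (cur ++ [pvGet s i] ++ [pvGet s (i + 1)])
            (by unfold pvMeas at *; omega)).2 fA gS q (by unfold pvMeas at *; omega)
            (by unfold pvMeas at *; omega) hq hd
          simp only [show i + 1 + 1 = i + 2 from by ring, List.append_assoc, List.singleton_append] at h2' ⊢
          exact h2'
        · rw [if_neg h3]
          rw [pvLoopB_exit s (gB2 + 1) (i + 1) depth args (cur ++ [pvGet s i]) (some q) true
            (fun hh => h3 hh.1)]
          rw [pvSkipLitA_exit s q gS _ (i + 2) (by push_neg; intro hh; exfalso; omega)]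
          dsimp only
          rw [if_neg (show ¬ (i + 2 < (s.length : Int)) from by omega)]
          rw [pvLoopA_exit s fA (i + 2 + 1) depth args _ (by push_neg; intro hh; exfalso; omega)]
          rw [if_pos (show depth ≠ 0 from by omega), if_pos (show depth ≠ 0 from by omega)]
      · -- ordinary character inside the literal
        simp only [pvLoopB, if_pos (And.intro hi hd), Bool.false_eq_true, if_false]
        rw [if_neg h2, if_neg h1]
        have hskip : pvSkipLitA s q (gS + 1) cur i = pvSkipLitA s q gS (cur ++ [pvGet s i]) (i + 1) := by
          simp only [pvSkipLitA, if_pos (And.intro hi (fun (hh : pvGet s i = q) => h1 hh)), if_neg h2]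
        rw [hskip]
        exact (IH gB hltB (i + 1) depth args (cur ++ [pvGet s i]) (by unfold pvMeas at *; omega)).2
          fA gS q (by unfold pvMeas at *; omega) (by unfold pvMeas at *; omega) hq hd
  · constructor
    · intro fA _
      rw [pvLoopA_exit s fA i depth args cur hid, pvLoopB_exit s fB i depth args cur none false hid]
    · intro fA fS q _ _ hq hd
      have hil : ¬ i < (s.length : Int) := fun hh => hid ⟨hh, hd⟩
      rw [pvLoopB_exit s fB i depth args cur (some q) false hid]
      rw [pvSkipLitA_exit s q fS cur i (by simp [hil])]
      dsimp only
      rw [if_neg hil]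
      rw [pvLoopA_exit s fA (i + 1) depth args cur (by push_neg; intro hh; exfalso; omega)]
      rw [if_pos (show depth ≠ 0 from by omega), if_pos (show depth ≠ 0 from by omega)]

-- ===== VERDICT (by name: the statement is the Claim_ definition above) =====
theorem parse_macro_args_py_spec : Claim_equal_parse_macro_args_py := by
  intro text start filename line_num _hdom _hpre
  unfold Spec_parse_macro_args_py parse_macro_args_py parse_macro_args_py_alt
  by_cases hg : (text.toList.length : Int) ≤ start
  · rw [if_pos hg, if_pos hg]
  · rw [if_neg hg, if_neg hg]
    rcases PySem.List.pyGet? text.toList start with _ | c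
    · rfl
    · dsimp only
      by_cases hc : c ≠ '('
      · rw [if_pos hc, if_pos hc]
      · rw [if_neg hc, if_neg hc]
        exact (pvMain text.toList (((text.toList.length : Int) - (start + 1)).toNat + 1)
          (start + 1) 1 [] [] (by unfold pvMeas; omega)).1 _ (by unfold pvMeas; omega)
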